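-- pv_equiv track=rewrite | github.com/PaddyCox/project-euler | problem_110/p_110_vii.py | di_sol
-- ===== SOURCE A (Python) =====
-- def di_sol(prime_dict):
--     n = 1
--     initial_sol = 1
--     sum_a = []
--     for d in prime_dict:
--         if prime_dict[d] > 0:
--             initial_sol *= 3
--             initial_sol -= 1
--             sum_a.append(prime_dict[d] - 1)
--             n *= d ** prime_dict[d]
--     for j in sum_a:
--         initial_sol += j * (initial_sol - (initial_sol + 1)//3)
--     return initial_sol, n
-- ===== SOURCE B (Python) =====
-- def di_sol(prime_dict):
--     prod = 1
--     n = 1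
--     for d, e in prime_dict.items():
--         if e > 0:
--             prod *= 2 * e + 1
--             n *= d ** e
--     return (prod + 1) // 2, n
-- ===== Notes on version B (the rewrite author's own statement) =====
-- stated objective: simpler
-- what changed: Replaces A's two-pass obfuscated computation (a 3s-1 recurrence over primes followed by a second adjustment loop with floor divisions over the stored exponents) by one pass accumulating the closed-form divisor-count product prod(2e+1) and returning (prod+1)//2.
import Mathlib
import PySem

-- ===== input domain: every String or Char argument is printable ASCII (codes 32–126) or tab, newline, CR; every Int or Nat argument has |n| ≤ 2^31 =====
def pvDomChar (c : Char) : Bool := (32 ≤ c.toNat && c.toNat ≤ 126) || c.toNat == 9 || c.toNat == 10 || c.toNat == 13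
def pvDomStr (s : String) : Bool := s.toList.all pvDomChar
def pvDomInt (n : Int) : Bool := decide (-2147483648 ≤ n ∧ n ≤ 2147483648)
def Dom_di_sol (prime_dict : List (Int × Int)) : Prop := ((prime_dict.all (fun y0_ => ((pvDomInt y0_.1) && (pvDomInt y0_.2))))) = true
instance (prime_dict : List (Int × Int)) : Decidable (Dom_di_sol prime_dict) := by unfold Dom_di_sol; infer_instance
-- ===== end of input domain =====

-- B replaces A's two-pass computation (3s-1 recurrence, then a floor-division adjustment loop)
-- by one pass accumulating the closed-form product prod(2e+1), returning (prod+1)//2 (simpler).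

-- ===== PORT A =====
-- Python 'prime_dict[d]' : first value whose key matches (the default is never used: d is a key
-- of the dict); A looks the value up afresh at each of its three uses, as the Python does.
def pyLookupD (l : List (Int × Int)) (k dflt : Int) : Int :=
  match l.find? (fun p => p.1 == k) with
  | some p => p.2
  | none => dflt

def di_sol (prime_dict : List (Int × Int)) : Int × Int :=
  -- state (n, initial_sol, sum_a); 'for d in prime_dict' iterates the keys
  let st := prime_dict.foldl (fun (acc : Int × Int × List Int) p =>
      if pyLookupD prime_dict p.1 0 > 0 then
        (acc.1 * p.1 ^ (pyLookupD prime_dict p.1 0).toNat, 3 * acc.2.1 - 1,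
         acc.2.2 ++ [pyLookupD prime_dict p.1 0 - 1])
      else acc) (1, 1, [])
  let s := st.2.2.foldl (fun s j => s + j * (s - PySem.Int.floordiv (s + 1) 3)) st.2.1
  (s, st.1)

-- ===== PORT B =====
def di_sol_alt (prime_dict : List (Int × Int)) : Int × Int :=
  let st := prime_dict.foldl (fun (acc : Int × Int) p =>
      if p.2 > 0 then (acc.1 * (2 * p.2 + 1), acc.2 * p.1 ^ p.2.toNat) else acc) (1, 1)
  (PySem.Int.floordiv (st.1 + 1) 2, st.2)

-- ===== PRECONDITION & SPEC =====
-- Pre_ excludes association lists with duplicate keys: such lists are unrepresentable as the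
-- Python dict A takes (a dict has unique keys), so no Python input is excluded; on them A's
-- port looks every occurrence up as the first value while B uses each pair's own value.
def Pre_di_sol (prime_dict : List (Int × Int)) : Prop := (prime_dict.map Prod.fst).Nodup
instance (prime_dict : List (Int × Int)) : Decidable (Pre_di_sol prime_dict) := by unfold Pre_di_sol; infer_instance
def pvWitness_di_sol : (List (Int × Int)) := [(2, 3), (3, -1), (5, 2)]
def Spec_di_sol (prime_dict : List (Int × Int)) (out : Int × Int) : Prop := out = di_sol_alt prime_dict
instance (prime_dict : List (Int × Int)) (out : Int × Int) : Decidable (Spec_di_sol prime_dict out) := by unfold Spec_di_sol; infer_instance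

-- ===== CLAIM (what is proved, stated in full; the proofs are below) =====
def Claim_equal_di_sol : Prop := ∀ (prime_dict : List (Int × Int)), Dom_di_sol prime_dict → Pre_di_sol prime_dict → Spec_di_sol prime_dict (di_sol prime_dict)

-- ===== LEMMAS AND PROOFS =====

-- under nodup keys, the lookup of a member pair's key returns that pair's value
theorem lookup_nodup (l : List (Int × Int)) (hnd : (l.map Prod.fst).Nodup)
    (p : Int × Int) (hp : p ∈ l) : pyLookupD l p.1 0 = p.2 := by
  induction l with
  | nil => cases hp
  | cons q t ih =>
    simp only [List.map_cons, List.nodup_cons] at hnd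
    rcases List.mem_cons.mp hp with h | h
    · subst h
      simp [pyLookupD, List.find?]
    · have hne : q.1 ≠ p.1 := by
        intro he
        exact hnd.1 (he ▸ List.mem_map_of_mem h)
      have hb : (q.1 == p.1) = false := by simp [hne]
      simpa [pyLookupD, List.find?, hb] using ih hnd.2 h

theorem foldl_congr_init {α β : Type} (f g : β → α → β) (l : List α)
    (h : ∀ x ∈ l, ∀ acc, f acc x = g acc x) : ∀ init, l.foldl f init = l.foldl g init := by
  induction l with
  | nil => intro init; rfl
  | cons x t ih =>
    intro init
    rw [List.foldl_cons, List.foldl_cons, h x (List.mem_cons_self ..) init]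
    exact ih (fun y hy => h y (List.mem_cons_of_mem x hy)) (g init x)

-- A's first loop with the lookup replaced by each pair's own value
def stepA (acc : Int × Int × List Int) (p : Int × Int) : Int × Int × List Int :=
  if p.2 > 0 then (acc.1 * p.1 ^ p.2.toNat, 3 * acc.2.1 - 1, acc.2.2 ++ [p.2 - 1]) else acc

theorem foldA_eq (prime_dict : List (Int × Int)) (hnd : (prime_dict.map Prod.fst).Nodup) :
    prime_dict.foldl (fun (acc : Int × Int × List Int) p =>
      if pyLookupD prime_dict p.1 0 > 0 then
        (acc.1 * p.1 ^ (pyLookupD prime_dict p.1 0).toNat, 3 * acc.2.1 - 1,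
         acc.2.2 ++ [pyLookupD prime_dict p.1 0 - 1])
      else acc) (1, 1, []) = prime_dict.foldl stepA (1, 1, []) := by
  refine foldl_congr_init _ _ _ (fun p hp acc => ?_) _
  rw [lookup_nodup prime_dict hnd p hp]
  rfl

-- first component of A's fold = B's n accumulator; third = appended exponents-minus-one
theorem foldA_n_js (l : List (Int × Int)) : ∀ (n s : Int) (js : List Int),
    (l.foldl stepA (n, s, js)).1 = l.foldl (fun (a : Int) p => if p.2 > 0 then a * p.1 ^ p.2.toNat else a) n ∧
    (l.foldl stepA (n, s, js)).2.2 = js ++ (l.filter (fun p => p.2 > 0)).map (fun p => p.2 - 1) := by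
  induction l with
  | nil => simp
  | cons p t ih =>
    intro n s js
    by_cases h : p.2 > 0
    · rw [List.filter_cons_of_pos (by simpa using h), List.map_cons,
        List.foldl_cons, List.foldl_cons, stepA, if_pos h, if_pos h]
      obtain ⟨h1, h2⟩ := ih (n * p.1 ^ p.2.toNat) (3 * s - 1) (js ++ [p.2 - 1])
      exact ⟨h1, by rw [h2, List.append_assoc]; rfl⟩
    · rw [List.filter_cons_of_neg (by simpa using h), List.foldl_cons, List.foldl_cons,
        stepA, if_neg h, if_neg h]
      exact ih n s js

-- invariant of the s component: 2*s = 3^(length sum_a) * x + 1 is preserved by the first loop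
theorem foldA_s (l : List (Int × Int)) : ∀ (n s : Int) (js : List Int) (x : Int),
    2 * s = 3 ^ js.length * x + 1 →
    2 * (l.foldl stepA (n, s, js)).2.1 = 3 ^ (l.foldl stepA (n, s, js)).2.2.length * x + 1 := by
  induction l with
  | nil => intro n s js x h; simpa using h
  | cons p t ih =>
    intro n s js x h
    by_cases hp : p.2 > 0
    · simp only [List.foldl_cons, stepA, if_pos hp]
      refine ih _ _ _ x ?_
      simp only [List.length_append, List.length_cons, List.length_nil]
      have h3 : (3:Int) ^ (js.length + 0 + 1) = 3 * 3 ^ js.length := by ring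
      rw [h3, mul_assoc]
      omega
    · simp only [List.foldl_cons, stepA, if_neg hp]
      exact ih _ _ _ x h

theorem fdiv_three (y : Int) : PySem.Int.floordiv (3 * y) 3 = y := by
  rw [PySem.Int.floordiv_eq_ediv_of_pos (by norm_num)]
  omega

-- second loop: from 2*s = 3^(len js)*x + 1 with x odd, compute the product of (2*j+3)
theorem loop2 (js : List Int) : ∀ (s x : Int), Odd x → 2 * s = 3 ^ js.length * x + 1 →
    2 * js.foldl (fun s j => s + j * (s - PySem.Int.floordiv (s + 1) 3)) s
      = js.foldl (fun q j => q * (2 * j + 3)) x + 1 := by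
  induction js with
  | nil => intro s x _ h; simpa using h
  | cons j t ih =>
    intro s x hx h
    simp only [List.length_cons] at h
    rw [pow_succ, mul_comm ((3:Int) ^ t.length) 3, mul_assoc] at h
    have h3odd : Odd ((3:Int) ^ t.length) := Odd.pow ⟨1, by norm_num⟩
    obtain ⟨m, hm⟩ := h3odd.mul hx
    rw [hm] at h
    have hs2 : s = 3 * m + 2 := by omega
    have hy : s + 1 = 3 * (m + 1) := by omega
    simp only [List.foldl_cons, hy, fdiv_three]
    have hx' : Odd (x * (2 * j + 3)) := hx.mul ⟨j + 1, by ring⟩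
    have hinv : 2 * (s + j * (s - (m + 1))) = 3 ^ t.length * (x * (2 * j + 3)) + 1 := by
      rw [← mul_assoc, hm, hs2]; ring
    exact ih (s + j * (s - (m + 1))) (x * (2 * j + 3)) hx' hinv

-- folding the product over the extracted exponents = B's one-pass product
theorem prod_eq (l : List (Int × Int)) : ∀ (q : Int),
    ((l.filter (fun p => p.2 > 0)).map (fun p => p.2 - 1)).foldl (fun q j => q * (2 * j + 3)) q
      = l.foldl (fun (a : Int) p => if p.2 > 0 then a * (2 * p.2 + 1) else a) q := by
  induction l with
  | nil => intro q; rfl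
  | cons p t ih =>
    intro q
    by_cases h : p.2 > 0
    · rw [List.filter_cons_of_pos (by simpa using h), List.map_cons, List.foldl_cons,
        List.foldl_cons, if_pos h]
      have e : q * (2 * (p.2 - 1) + 3) = q * (2 * p.2 + 1) := by ring
      rw [e, ih]
    · rw [List.filter_cons_of_neg (by simpa using h), List.foldl_cons, if_neg h]
      exact ih q

-- the two components of B's pair fold, separately
theorem foldB_fst (l : List (Int × Int)) : ∀ (a b : Int),
    (l.foldl (fun (acc : Int × Int) p =>
        if p.2 > 0 then (acc.1 * (2 * p.2 + 1), acc.2 * p.1 ^ p.2.toNat) else acc) (a, b)).1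
      = l.foldl (fun (q : Int) p => if p.2 > 0 then q * (2 * p.2 + 1) else q) a := by
  induction l with
  | nil => intro a b; rfl
  | cons p t ih => intro a b; by_cases h : p.2 > 0 <;> simp [h, ih]

theorem foldB_snd (l : List (Int × Int)) : ∀ (a b : Int),
    (l.foldl (fun (acc : Int × Int) p =>
        if p.2 > 0 then (acc.1 * (2 * p.2 + 1), acc.2 * p.1 ^ p.2.toNat) else acc) (a, b)).2
      = l.foldl (fun (n : Int) p => if p.2 > 0 then n * p.1 ^ p.2.toNat else n) b := by
  induction l with
  | nil => intro a b; rfl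
  | cons p t ih => intro a b; by_cases h : p.2 > 0 <;> simp [h, ih]

theorem fdiv_two (y : Int) : PySem.Int.floordiv (2 * y) 2 = y := by
  rw [PySem.Int.floordiv_eq_ediv_of_pos (by norm_num)]
  omega

-- ===== VERDICT (by name: the statement is the Claim_ definition above) =====
theorem di_sol_spec : Claim_equal_di_sol := by
  intro l _ hpre
  unfold Spec_di_sol di_sol di_sol_alt
  dsimp only
  rw [foldA_eq l hpre]
  obtain ⟨hn, hjs⟩ := foldA_n_js l 1 1 []
  have hs := foldA_s l 1 1 [] 1 (by norm_num)
  have h2 := loop2 (l.foldl stepA (1, 1, [])).2.2 (l.foldl stepA (1, 1, [])).2.1 1 ⟨0, by norm_num⟩ hs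
  rw [hjs] at h2
  simp only [List.nil_append] at h2
  rw [prod_eq l 1] at h2
  rw [foldB_fst l 1 1, foldB_snd l 1 1]
  refine Prod.ext ?_ (by rw [hn])
  show _ = PySem.Int.floordiv _ 2
  rw [← h2, hjs]
  simp only [List.nil_append]
  rw [fdiv_two]
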